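-- pv_equiv track=rewrite | github.com/nihilisticneuralnet/DaVinki | src/spatial_aware_algo.py | generate_spiral_order
-- ===== SOURCE A (Python) =====
-- def generate_spiral_order(start_row, start_col, grid_size):
--     visited = set()
--     order = []
--
--     queue = [(start_row, start_col, 0)]
--
--     while queue:
--         queue.sort(key=lambda x: x[2])
--         row, col, dist = queue.pop(0)
--
--         if (row, col) in visited:
--             continue
--
--         if 0 <= row < grid_size[0] and 0 <= col < grid_size[1]:
--             visited.add((row, col))
--             tile_idx = row * grid_size[1] + col
--             order.append(tile_idx)
--
--             for dr, dc in [(-1, 0), (1, 0), (0, -1), (0, 1)]: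
--                 new_row, new_col = row + dr, col + dc
--                 if (new_row, new_col) not in visited:
--                     new_dist = abs(new_row - start_row) + abs(new_col - start_col)
--                     queue.append((new_row, new_col, new_dist))
--
--     return order
-- ===== SOURCE B (Python) =====
-- def generate_spiral_order(start_row, start_col, grid_size):
--     # level (ring) BFS: no priority queue, no sorting -- cells are produced one
--     # Manhattan-distance ring at a time, each ring expanded FIFO from the previous one
--     if start_row < 0 or start_row >= grid_size[0] or start_col < 0 or start_col >= grid_size[1]:
--         return []
--     rows, cols = grid_size[0], grid_size[1]
--     visited = set()
--     order = []
--     cur = [(start_row, start_col)]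
--     d = 0
--     while cur:
--         nxt = []
--         for r, c in cur:
--             if (r, c) in visited or not (0 <= r < rows and 0 <= c < cols):
--                 continue
--             visited.add((r, c))
--             order.append(r * cols + c)
--             for nr, nc in ((r - 1, c), (r + 1, c), (r, c - 1), (r, c + 1)):
--                 if (nr, nc) not in visited and abs(nr - start_row) + abs(nc - start_col) == d + 1:
--                     nxt.append((nr, nc))
--         cur = nxt
--         d += 1
--     return order
-- ===== Notes on version B (the rewrite author's own statement) =====
-- stated objective: alternative
-- what changed: B replaces A's priority-queue BFS (the whole queue is stable-sorted by Manhattan distance on every iteration before popping) by a level BFS with no priority queue at all: cells are produced one distance ring at a time from two plain frontier lists, each next ring collected by a single pass over the current ring keeping only neighbours whose distance grows by one.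
import Mathlib
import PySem

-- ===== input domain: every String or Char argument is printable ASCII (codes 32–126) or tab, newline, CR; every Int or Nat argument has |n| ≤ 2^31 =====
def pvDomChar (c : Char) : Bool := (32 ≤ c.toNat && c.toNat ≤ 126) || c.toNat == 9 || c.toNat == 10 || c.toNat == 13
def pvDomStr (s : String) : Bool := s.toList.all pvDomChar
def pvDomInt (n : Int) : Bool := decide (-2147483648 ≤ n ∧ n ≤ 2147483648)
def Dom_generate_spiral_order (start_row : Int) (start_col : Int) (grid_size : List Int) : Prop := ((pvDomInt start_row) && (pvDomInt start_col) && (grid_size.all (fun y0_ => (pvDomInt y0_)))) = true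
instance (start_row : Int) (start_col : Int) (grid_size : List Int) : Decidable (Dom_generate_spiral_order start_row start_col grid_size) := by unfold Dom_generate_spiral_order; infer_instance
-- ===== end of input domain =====

-- B replaces A's priority queue (re-sorted in full on every iteration) by a
-- level BFS over Manhattan-distance rings: two plain frontier lists, no sort,
-- no distance-keyed queue (objective: alternative).

-- ===== PORT A =====

-- the sort key of A's `queue.sort(key=lambda x: x[2])`
def pvKey (t : Int × Int × Int) : Int := t.2.2

-- A's while-loop: sort the queue by dist, pop the front, visit, append neighbours.
-- The fuel argument only makes the recursion structural; `pvFuel` below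
-- dominates the number of iterations (every iteration consumes one queue entry and
-- at most 1 + 4*rows*cols entries are ever enqueued), so the loop always exits
-- through its `queue = []` branch, exactly like Python's `while queue`.
-- grid_size[0]/grid_size[1] are ported with pyGetD (default 0): exact wherever the
-- Python does not raise IndexError; Pre_ excludes exactly the raising inputs.
def spiralLoopA (start_row start_col : Int) (grid_size : List Int) :
    Nat → List (Int × Int × Int) → PySem.Set (Int × Int) → List Int → List Int
  | 0, _, _, order => order
  | fuel + 1, queue, visited, order =>
    match PySem.List.sorted queue pvKey with
    | [] => order
    | (row, col, _dist) :: rest =>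
      if (row, col) ∈ visited then
        spiralLoopA start_row start_col grid_size fuel rest visited order
      else if 0 ≤ row ∧ row < PySem.List.pyGetD grid_size 0 0 ∧ 0 ≤ col ∧ col < PySem.List.pyGetD grid_size 1 0 then
        let visited' := PySem.Set.add visited (row, col)
        let order' := order ++ [row * PySem.List.pyGetD grid_size 1 0 + col]
        let queue' := [(row - 1, col), (row + 1, col), (row, col - 1), (row, col + 1)].foldl
          (fun q p => if p ∈ visited' then q else q ++ [(p.1, p.2, |p.1 - start_row| + |p.2 - start_col|)]) rest
        spiralLoopA start_row start_col grid_size fuel queue' visited' order'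
      else
        spiralLoopA start_row start_col grid_size fuel rest visited order

-- an upper bound on the number of loop iterations (1 initial entry, ≤ 4 pushes per visited cell)
def pvFuel (grid_size : List Int) : Nat :=
  4 * ((PySem.List.pyGetD grid_size 0 0).toNat * (PySem.List.pyGetD grid_size 1 0).toNat) + 1

def generate_spiral_order (start_row : Int) (start_col : Int) (grid_size : List Int) : List Int :=
  spiralLoopA start_row start_col grid_size (pvFuel grid_size) [(start_row, start_col, 0)] [] []

-- ===== PORT B =====

-- Source B's loop body over one frontier cell: skip if visited or out of bounds,
-- else visit it and append its distance-(d+1) neighbours to the next frontier.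
def ringStep (start_row start_col rows cols d : Int)
    (acc : PySem.Set (Int × Int) × List Int × List (Int × Int)) (rc : Int × Int) :
    PySem.Set (Int × Int) × List Int × List (Int × Int) :=
  if rc ∈ acc.1 ∨ ¬(0 ≤ rc.1 ∧ rc.1 < rows ∧ 0 ≤ rc.2 ∧ rc.2 < cols) then acc
  else
    let visited' := PySem.Set.add acc.1 rc
    let order' := acc.2.1 ++ [rc.1 * cols + rc.2]
    let nxt' := [(rc.1 - 1, rc.2), (rc.1 + 1, rc.2), (rc.1, rc.2 - 1), (rc.1, rc.2 + 1)].foldl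
      (fun n p => if p ∉ visited' ∧ |p.1 - start_row| + |p.2 - start_col| = d + 1 then n ++ [p] else n)
      acc.2.2
    (visited', order', nxt')

-- Source B's `while cur:` — one recursion step per distance ring; `pvFuelB` below
-- dominates the ring count (each nonfinal ring visits at least one new cell of the
-- rows*cols grid), so the loop always exits through its `cur = []` branch.
def ringLoop (start_row start_col rows cols : Int) :
    Nat → List (Int × Int) → PySem.Set (Int × Int) → List Int → Int → List Int
  | 0, _, _, order, _ => order
  | fuel + 1, cur, visited, order, d =>
    if cur.isEmpty then order
    else
      let st := cur.foldl (ringStep start_row start_col rows cols d) (visited, order, [])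
      ringLoop start_row start_col rows cols fuel st.2.2 st.1 st.2.1 (d + 1)

def pvFuelB (rows cols : Int) : Nat := rows.toNat * cols.toNat + 1

def generate_spiral_order_alt (start_row : Int) (start_col : Int) (grid_size : List Int) : List Int :=
  -- Source B's early-out guard (same short-circuit order as the Python `or` chain)
  if start_row < 0 ∨ PySem.List.pyGetD grid_size 0 0 ≤ start_row
      ∨ start_col < 0 ∨ PySem.List.pyGetD grid_size 1 0 ≤ start_col then []
  else
    let rows := PySem.List.pyGetD grid_size 0 0
    let cols := PySem.List.pyGetD grid_size 1 0
    ringLoop start_row start_col rows cols (pvFuelB rows cols) [(start_row, start_col)] [] [] 0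

-- ===== PRECONDITION & SPEC =====
-- Pre_ excludes exactly the inputs on which the Python A raises IndexError while
-- indexing grid_size (grid_size shorter than the accesses reached by the
-- short-circuiting bounds checks); B raises on exactly the same inputs.
def Pre_generate_spiral_order (start_row : Int) (start_col : Int) (grid_size : List Int) : Prop :=
  2 ≤ grid_size.length ∨ start_row < 0 ∨
    (grid_size ≠ [] ∧ (grid_size.headI ≤ start_row ∨ start_col < 0))

instance (start_row : Int) (start_col : Int) (grid_size : List Int) : Decidable (Pre_generate_spiral_order start_row start_col grid_size) := by unfold Pre_generate_spiral_order; infer_instance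

def pvWitness_generate_spiral_order : Int × Int × List Int := (0, 0, [2, 2])

def Spec_generate_spiral_order (start_row : Int) (start_col : Int) (grid_size : List Int) (out : List Int) : Prop := out = generate_spiral_order_alt start_row start_col grid_size
instance (start_row : Int) (start_col : Int) (grid_size : List Int) (out : List Int) : Decidable (Spec_generate_spiral_order start_row start_col grid_size out) := by unfold Spec_generate_spiral_order; infer_instance

-- ===== CLAIM (what is proved, stated in full; the proofs are below) =====
def Claim_equal_generate_spiral_order : Prop := ∀ (start_row : Int) (start_col : Int) (grid_size : List Int), Dom_generate_spiral_order start_row start_col grid_size → Pre_generate_spiral_order start_row start_col grid_size → Spec_generate_spiral_order start_row start_col grid_size (generate_spiral_order start_row start_col grid_size)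

-- ===== LEMMAS AND PROOFS =====

-- ---------- stage 1: A with its per-iteration re-sort equals the same loop on a
-- ---------- permanently sorted queue (stable insertion at push time)

def insBackRev (item : Int × Int × Int) : List (Int × Int × Int) → List (Int × Int × Int)
  | [] => [item]
  | y :: t => if item.2.2 < y.2.2 then y :: insBackRev item t else item :: y :: t

def pushB (queue : List (Int × Int × Int)) (item : Int × Int × Int) : List (Int × Int × Int) :=
  (insBackRev item queue.reverse).reverse

-- proof-side twin of A's loop: queue kept sorted, pops from the front
def spiralLoopS (start_row start_col : Int) (grid_size : List Int) :
    Nat → List (Int × Int × Int) → PySem.Set (Int × Int) → List Int → List Int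
  | 0, _, _, order => order
  | fuel + 1, queue, visited, order =>
    match queue with
    | [] => order
    | (row, col, _dist) :: rest =>
      if (row, col) ∈ visited then
        spiralLoopS start_row start_col grid_size fuel rest visited order
      else if 0 ≤ row ∧ row < PySem.List.pyGetD grid_size 0 0 ∧ 0 ≤ col ∧ col < PySem.List.pyGetD grid_size 1 0 then
        let visited' := PySem.Set.add visited (row, col)
        let order' := order ++ [row * PySem.List.pyGetD grid_size 1 0 + col]
        let queue' := [(row - 1, col), (row + 1, col), (row, col - 1), (row, col + 1)].foldl
          (fun q p => if p ∈ visited' then q else pushB q (p.1, p.2, |p.1 - start_row| + |p.2 - start_col|)) rest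
        spiralLoopS start_row start_col grid_size fuel queue' visited' order'
      else
        spiralLoopS start_row start_col grid_size fuel rest visited order

-- the stable sort of `q ++ [x]` is `x` inserted (stably) into the stable sort of `q`
lemma pv_sorted_append_singleton (q : List (Int × Int × Int)) (x : Int × Int × Int) :
    PySem.List.sorted (q ++ [x]) pvKey =
      PySem.List.insertBy (fun a b => decide (pvKey a < pvKey b)) x (PySem.List.sorted q pvKey) := by
  rw [PySem.List.sorted_eq_foldl_insertBy, PySem.List.sorted_eq_foldl_insertBy, List.foldl_append]
  simp

lemma pv_insertBy_append_of_before (bf : (Int × Int × Int) → (Int × Int × Int) → Bool)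
    (x y : Int × Int × Int) (hb : bf x y = true) :
    ∀ as, PySem.List.insertBy bf x (as ++ [y]) = PySem.List.insertBy bf x as ++ [y] := by
  intro as
  induction as with
  | nil => simp [PySem.List.insertBy, hb]
  | cons a t ih =>
    by_cases ha : bf x a
    · simp [PySem.List.insertBy, ha]
    · simp [PySem.List.insertBy, ha, ih]

-- the backward scan of pushB = Python's stable insertion, on a nonincreasing (= reversed sorted) list
lemma pv_insBackRev_eq (x : Int × Int × Int) :
    ∀ (l : List (Int × Int × Int)), l.Pairwise (fun a b => pvKey b ≤ pvKey a) →
      (insBackRev x l).reverse = PySem.List.insertBy (fun a b => decide (pvKey a < pvKey b)) x l.reverse := by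
  intro l
  induction l with
  | nil => simp [insBackRev, PySem.List.insertBy]
  | cons y t ih =>
    intro hp
    rw [List.pairwise_cons] at hp
    obtain ⟨hy, ht⟩ := hp
    by_cases hlt : x.2.2 < y.2.2
    · rw [insBackRev, if_pos hlt]
      simp only [List.reverse_cons]
      rw [ih ht, pv_insertBy_append_of_before _ _ _ (by simpa [pvKey] using hlt)]
    · rw [insBackRev, if_neg hlt]
      simp only [List.reverse_cons]
      rw [PySem.List.insertBy_of_forall_not_before _ _ _ ?_]
      · intro z hz
        simp only [List.mem_append, List.mem_reverse, List.mem_singleton] at hz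
        simp only [decide_eq_false_iff_not, pvKey, not_lt]
        rcases hz with hz | rfl
        · have h1 := hy z hz
          simp only [pvKey] at h1
          omega
        · omega

lemma pv_pushB_sorted (q : List (Int × Int × Int)) (x : Int × Int × Int) :
    pushB (PySem.List.sorted q pvKey) x = PySem.List.sorted (q ++ [x]) pvKey := by
  rw [pv_sorted_append_singleton]
  unfold pushB
  rw [pv_insBackRev_eq]
  · rw [List.reverse_reverse]
  · rw [List.pairwise_reverse]
    exact PySem.List.sorted_pairwise q pvKey

-- the conditional insertion fold keeps the queue equal to the stable sort of A's appended queue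
lemma pv_foldl_pushB_sorted (v : List (Int × Int)) (e : Int × Int → Int × Int × Int) :
    ∀ (l : List (Int × Int)) (q : List (Int × Int × Int)),
      l.foldl (fun q p => if p ∈ v then q else pushB q (e p)) (PySem.List.sorted q pvKey) =
        PySem.List.sorted (l.foldl (fun q p => if p ∈ v then q else q ++ [e p]) q) pvKey := by
  intro l
  induction l with
  | nil => intro q; rfl
  | cons p t ih =>
    intro q
    simp only [List.foldl_cons]
    by_cases hc : p ∈ v
    · simp only [hc, if_true]
      exact ih q
    · simp only [hc, if_false]
      rw [pv_pushB_sorted]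
      exact ih (q ++ [e p])

theorem loopS_eq_loopA (start_row start_col : Int) (grid_size : List Int) :
    ∀ (fuel : Nat) (queue : List (Int × Int × Int)) (visited : PySem.Set (Int × Int)) (order : List Int),
      spiralLoopS start_row start_col grid_size fuel (PySem.List.sorted queue pvKey) visited order =
        spiralLoopA start_row start_col grid_size fuel queue visited order := by
  intro fuel
  induction fuel with
  | zero => intro queue visited order; rfl
  | succ fuel ih =>
    intro queue visited order
    rcases h : PySem.List.sorted queue pvKey with _ | ⟨⟨row, col, d⟩, rest⟩
    · simp only [spiralLoopA, spiralLoopS, h]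
    · have hp := PySem.List.sorted_pairwise queue pvKey
      rw [h] at hp
      have hsr : PySem.List.sorted rest pvKey = rest :=
        PySem.List.sorted_eq_self_of_pairwise _ _ hp.of_cons
      simp only [spiralLoopA, spiralLoopS, h]
      by_cases hv : (row, col) ∈ visited
      · rw [if_pos hv, if_pos hv, ← hsr, ih, hsr]
      · rw [if_neg hv, if_neg hv]
        by_cases hb : 0 ≤ row ∧ row < PySem.List.pyGetD grid_size 0 0 ∧
            0 ≤ col ∧ col < PySem.List.pyGetD grid_size 1 0
        · rw [if_pos hb, if_pos hb]
          conv_lhs => rw [← hsr]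
          simp only [pv_foldl_pushB_sorted]
          exact ih _ _ _
        · rw [if_neg hb, if_neg hb, ← hsr, ih, hsr]

lemma A_eq_S (start_row start_col : Int) (grid_size : List Int) :
    generate_spiral_order start_row start_col grid_size =
      spiralLoopS start_row start_col grid_size (pvFuel grid_size) [(start_row, start_col, 0)] [] [] := by
  unfold generate_spiral_order
  rw [← loopS_eq_loopA,
    PySem.List.sorted_eq_self_of_pairwise _ _ (List.pairwise_singleton _ _)]

-- ---------- stage 2: the sorted-queue loop equals B's ring BFS

def pvDist (start_row start_col : Int) (p : Int × Int) : Int :=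
  |p.1 - start_row| + |p.2 - start_col|

def pvAtt (start_row start_col : Int) (p : Int × Int) : Int × Int × Int :=
  (p.1, p.2, pvDist start_row start_col p)

def pvNbrs (p : Int × Int) : List (Int × Int) :=
  [(p.1 - 1, p.2), (p.1 + 1, p.2), (p.1, p.2 - 1), (p.1, p.2 + 1)]

lemma pvDist_nonneg (sr sc : Int) (p : Int × Int) : 0 ≤ pvDist sr sc p := by
  unfold pvDist; positivity

lemma nbr_dist (sr sc : Int) (t : Int × Int) :
    ∀ p ∈ pvNbrs t, pvDist sr sc p = pvDist sr sc t - 1 ∨ pvDist sr sc p = pvDist sr sc t + 1 := by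
  intro p hp
  simp only [pvNbrs, List.mem_cons, List.not_mem_nil, or_false] at hp
  rcases hp with rfl | rfl | rfl | rfl <;>
    simp only [pvDist, Int.abs_eq_natAbs] <;> omega

-- every in-grid cell at distance d+1 ≥ 1 has an in-grid neighbour at distance d
lemma pv_toward (sr sc rows cols : Int)
    (hs : 0 ≤ sr ∧ sr < rows ∧ 0 ≤ sc ∧ sc < cols) (q : Int × Int)
    (hq : 0 ≤ q.1 ∧ q.1 < rows ∧ 0 ≤ q.2 ∧ q.2 < cols) (hd : 1 ≤ pvDist sr sc q) :
    ∃ t : Int × Int, (0 ≤ t.1 ∧ t.1 < rows ∧ 0 ≤ t.2 ∧ t.2 < cols) ∧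
      pvDist sr sc t = pvDist sr sc q - 1 ∧ q ∈ pvNbrs t := by
  obtain ⟨q1, q2⟩ := q
  simp only [pvDist, Int.abs_eq_natAbs] at hd
  simp only at hq
  by_cases h1 : sr < q1
  · refine ⟨(q1 - 1, q2), by simp only []; omega,
      by simp only [pvDist, Int.abs_eq_natAbs]; omega, ?_⟩
    simp [pvNbrs]
  · by_cases h2 : q1 < sr
    · refine ⟨(q1 + 1, q2), by simp only []; omega,
        by simp only [pvDist, Int.abs_eq_natAbs]; omega, ?_⟩
      simp [pvNbrs]
    · by_cases h3 : sc < q2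
      · refine ⟨(q1, q2 - 1), by simp only []; omega,
          by simp only [pvDist, Int.abs_eq_natAbs]; omega, ?_⟩
        simp [pvNbrs]
      · refine ⟨(q1, q2 + 1), by simp only []; omega,
          by simp only [pvDist, Int.abs_eq_natAbs]; omega, ?_⟩
        simp [pvNbrs]

-- a nodup list of in-grid cells has at most rows*cols elements
lemma pv_card_le (rows cols : Int) (l : List (Int × Int)) (hnd : l.Nodup)
    (hinb : ∀ p ∈ l, 0 ≤ p.1 ∧ p.1 < rows ∧ 0 ≤ p.2 ∧ p.2 < cols) :
    l.length ≤ rows.toNat * cols.toNat := by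
  have hsub : l.toFinset ⊆ (Finset.Ico 0 rows) ×ˢ (Finset.Ico 0 cols) := by
    intro p hp
    rw [List.mem_toFinset] at hp
    have := hinb p hp
    simp only [Finset.mem_product, Finset.mem_Ico]
    exact ⟨⟨this.1, this.2.1⟩, this.2.2.1, this.2.2.2⟩
  have hcard := Finset.card_le_card hsub
  rw [List.toFinset_card_of_nodup hnd] at hcard
  simpa [Int.card_Ico] using hcard

-- both loops return the accumulated order once the queue/frontier is empty
lemma loopS_nil (sr sc : Int) (gs : List Int) (fuel : Nat) (v : PySem.Set (Int × Int)) (o : List Int) :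
    spiralLoopS sr sc gs fuel [] v o = o := by
  cases fuel <;> rfl

lemma ringLoop_nil (sr sc rows cols : Int) (fuel : Nat) (v : PySem.Set (Int × Int)) (o : List Int) (d : Int) :
    ringLoop sr sc rows cols fuel [] v o d = o := by
  cases fuel <;> simp [ringLoop]

-- dead queue entries (already visited or out of bounds) are skipped one per step
lemma loopS_skip (sr sc : Int) (gs : List Int) :
    ∀ (J : List (Int × Int × Int)), ∀ (Q : List (Int × Int × Int)) (v : PySem.Set (Int × Int)) (o : List Int),
      (∀ e ∈ J, (e.1, e.2.1) ∈ v ∨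
        ¬(0 ≤ e.1 ∧ e.1 < PySem.List.pyGetD gs 0 0 ∧ 0 ≤ e.2.1 ∧ e.2.1 < PySem.List.pyGetD gs 1 0)) →
      ∀ slack, spiralLoopS sr sc gs (J.length + slack) (J ++ Q) v o = spiralLoopS sr sc gs slack Q v o := by
  intro J
  induction J with
  | nil => intro Q v o _ slack; simp
  | cons e J' ih =>
    intro Q v o hJ slack
    obtain ⟨r, c, dd⟩ := e
    have hlen : (((r, c, dd) :: J').length + slack) = (J'.length + slack) + 1 := by
      simp; omega
    rw [hlen]
    have hd := hJ _ (List.mem_cons_self)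
    simp only at hd
    by_cases hv : (r, c) ∈ v
    · simp only [spiralLoopS, List.cons_append, if_pos hv]
      exact ih Q v o (fun e he => hJ e (List.mem_cons_of_mem _ he)) slack
    · rcases hd with hd | hd
      · exact absurd hd hv
      · simp only [spiralLoopS, List.cons_append, if_neg hv, if_neg hd]
        exact ih Q v o (fun e he => hJ e (List.mem_cons_of_mem _ he)) slack

-- stable insertion of x between a block of keys ≤ x and a block of keys > x
lemma pv_insBackRev_split (x : Int × Int × Int) :
    ∀ (a b : List (Int × Int × Int)), (∀ y ∈ a, x.2.2 < y.2.2) → (∀ y ∈ b, y.2.2 ≤ x.2.2) →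
      insBackRev x (a ++ b) = a ++ x :: b := by
  intro a
  induction a with
  | nil =>
    intro b _ hb
    cases b with
    | nil => rfl
    | cons y t =>
      have : ¬ x.2.2 < y.2.2 := by have := hb y (List.mem_cons_self); omega
      simp [insBackRev, this]
  | cons y t ih =>
    intro b ha hb
    have : x.2.2 < y.2.2 := ha y (List.mem_cons_self)
    simp only [List.cons_append, insBackRev, if_pos this]
    rw [ih b (fun z hz => ha z (List.mem_cons_of_mem _ hz)) hb]

lemma pv_pushB_middle (x : Int × Int × Int) (q1 q2 : List (Int × Int × Int))
    (h1 : ∀ y ∈ q1, y.2.2 ≤ x.2.2) (h2 : ∀ y ∈ q2, x.2.2 < y.2.2) :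
    pushB (q1 ++ q2) x = q1 ++ x :: q2 := by
  unfold pushB
  rw [List.reverse_append,
    pv_insBackRev_split x q2.reverse q1.reverse
      (fun y hy => h2 y (List.mem_reverse.mp hy))
      (fun y hy => h1 y (List.mem_reverse.mp hy))]
  simp

-- the A-side neighbour fold: distance-(d-1) pushes line up in order behind the junk
-- block at the front, distance-(d+1) pushes line up in order at the back
lemma pv_pushFold (sr sc d : Int) (v' : PySem.Set (Int × Int)) :
    ∀ (ps : List (Int × Int)) (J C N : List (Int × Int)),
      (∀ p ∈ ps, pvDist sr sc p = d - 1 ∨ pvDist sr sc p = d + 1) →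
      (∀ p ∈ J, pvDist sr sc p = d - 1) →
      (∀ p ∈ C, pvDist sr sc p = d) →
      (∀ p ∈ N, pvDist sr sc p = d + 1) →
      ps.foldl (fun q p => if p ∈ v' then q else pushB q (p.1, p.2, |p.1 - sr| + |p.2 - sc|))
          (List.map (pvAtt sr sc) J ++ List.map (pvAtt sr sc) C ++ List.map (pvAtt sr sc) N)
        = List.map (pvAtt sr sc) (J ++ ps.filter (fun p => decide (p ∉ v' ∧ pvDist sr sc p = d - 1)))
            ++ List.map (pvAtt sr sc) C
            ++ List.map (pvAtt sr sc) (N ++ ps.filter (fun p => decide (p ∉ v' ∧ pvDist sr sc p = d + 1))) := by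
  intro ps
  induction ps with
  | nil => intro J C N _ _ _ _; simp
  | cons p t ih =>
    intro J C N hps hJ hC hN
    have hpd := hps p (List.mem_cons_self)
    simp only [List.foldl_cons, List.filter_cons]
    by_cases hpv : p ∈ v'
    · have e1 : (decide (p ∉ v' ∧ pvDist sr sc p = d - 1)) = false := by simp [hpv]
      have e2 : (decide (p ∉ v' ∧ pvDist sr sc p = d + 1)) = false := by simp [hpv]
      rw [e1, e2, if_pos hpv]
      exact ih J C N (fun q hq => hps q (List.mem_cons_of_mem _ hq)) hJ hC hN
    · rw [if_neg hpv]
      have hatt : (p.1, p.2, |p.1 - sr| + |p.2 - sc|) = pvAtt sr sc p := rfl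
      rcases hpd with hpd | hpd
      · have e1 : (decide (p ∉ v' ∧ pvDist sr sc p = d - 1)) = true := by simp [hpv, hpd]
        have e2 : (decide (p ∉ v' ∧ pvDist sr sc p = d + 1)) = false := by
          simp only [decide_eq_false_iff_not, not_and]
          intro _; omega
        rw [e1, e2]
        have hins : pushB (List.map (pvAtt sr sc) J ++ List.map (pvAtt sr sc) C ++ List.map (pvAtt sr sc) N)
            (p.1, p.2, |p.1 - sr| + |p.2 - sc|)
            = List.map (pvAtt sr sc) (J ++ [p]) ++ List.map (pvAtt sr sc) C ++ List.map (pvAtt sr sc) N := by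
          rw [hatt, List.append_assoc, pv_pushB_middle]
          · simp
          · intro y hy
            simp only [List.mem_map] at hy
            obtain ⟨z, hz, rfl⟩ := hy
            simp only [pvAtt]
            have := hJ z hz
            simp only [pvDist] at this hpd ⊢
            omega
          · intro y hy
            simp only [List.mem_append, List.mem_map] at hy
            rcases hy with ⟨z, hz, rfl⟩ | ⟨z, hz, rfl⟩
            · have := hC z hz
              simp only [pvAtt, pvDist] at this hpd ⊢
              omega
            · have := hN z hz
              simp only [pvAtt, pvDist] at this hpd ⊢
              omega
        rw [hins, ih (J ++ [p]) C N (fun q hq => hps q (List.mem_cons_of_mem _ hq))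
          (by intro q hq; rcases List.mem_append.mp hq with h | h
              · exact hJ q h
              · rw [List.mem_singleton.mp h]; exact hpd) hC hN]
        simp
      · have e1 : (decide (p ∉ v' ∧ pvDist sr sc p = d - 1)) = false := by
          simp only [decide_eq_false_iff_not, not_and]
          intro _; omega
        have e2 : (decide (p ∉ v' ∧ pvDist sr sc p = d + 1)) = true := by simp [hpv, hpd]
        rw [e1, e2]
        have hins : pushB (List.map (pvAtt sr sc) J ++ List.map (pvAtt sr sc) C ++ List.map (pvAtt sr sc) N)
            (p.1, p.2, |p.1 - sr| + |p.2 - sc|)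
            = List.map (pvAtt sr sc) J ++ List.map (pvAtt sr sc) C ++ List.map (pvAtt sr sc) (N ++ [p]) := by
          rw [hatt]
          have := pv_pushB_middle (pvAtt sr sc p)
            (List.map (pvAtt sr sc) J ++ List.map (pvAtt sr sc) C ++ List.map (pvAtt sr sc) N) []
            (by
              intro y hy
              simp only [List.mem_append, List.mem_map] at hy
              rcases hy with (⟨z, hz, rfl⟩ | ⟨z, hz, rfl⟩) | ⟨z, hz, rfl⟩
              · have := hJ z hz; simp only [pvAtt, pvDist] at this hpd ⊢; omega
              · have := hC z hz; simp only [pvAtt, pvDist] at this hpd ⊢; omega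
              · have := hN z hz; simp only [pvAtt, pvDist] at this hpd ⊢; omega)
            (by intro y hy; simp at hy)
          simpa using this
        rw [hins, ih J C (N ++ [p]) (fun q hq => hps q (List.mem_cons_of_mem _ hq)) hJ hC
          (by intro q hq; rcases List.mem_append.mp hq with h | h
              · exact hN q h
              · rw [List.mem_singleton.mp h]; exact hpd)]
        simp

-- sums of lengths of two disjoint filters
lemma pv_filter_disjoint_len {α : Type} (p q : α → Bool) (h : ∀ x, ¬(p x = true ∧ q x = true)) :
    ∀ l : List α, (l.filter p).length + (l.filter q).length ≤ l.length := by
  intro l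
  induction l with
  | nil => simp
  | cons a t ih =>
    simp only [List.filter_cons]
    by_cases hp : p a = true
    · have hq : ¬ (q a = true) := fun hq' => h a ⟨hp, hq'⟩
      simp only [if_pos hp, if_neg hq, List.length_cons]
      omega
    · by_cases hq : q a = true
      · simp only [if_neg hp, if_pos hq, List.length_cons]
        omega
      · simp only [if_neg hp, if_neg hq, List.length_cons]
        omega

-- B's one-cell step, spelled out on the two branches
lemma ringStep_dead (sr sc rows cols d : Int) (acc : PySem.Set (Int × Int) × List Int × List (Int × Int))
    (rc : Int × Int) (h : rc ∈ acc.1 ∨ ¬(0 ≤ rc.1 ∧ rc.1 < rows ∧ 0 ≤ rc.2 ∧ rc.2 < cols)) :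
    ringStep sr sc rows cols d acc rc = acc := by
  unfold ringStep; rw [if_pos h]

lemma ringStep_live (sr sc rows cols d : Int) (acc : PySem.Set (Int × Int) × List Int × List (Int × Int))
    (rc : Int × Int) (h1 : rc ∉ acc.1) (h2 : 0 ≤ rc.1 ∧ rc.1 < rows ∧ 0 ≤ rc.2 ∧ rc.2 < cols) :
    ringStep sr sc rows cols d acc rc =
      (PySem.Set.add acc.1 rc, acc.2.1 ++ [rc.1 * cols + rc.2],
        acc.2.2 ++ (pvNbrs rc).filter
          (fun p => decide (p ∉ PySem.Set.add acc.1 rc ∧ pvDist sr sc p = d + 1))) := by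
  have hneg : ¬(rc ∈ acc.1 ∨ ¬(0 ≤ rc.1 ∧ rc.1 < rows ∧ 0 ≤ rc.2 ∧ rc.2 < cols)) := by
    push_neg; exact ⟨h1, h2⟩
  simp only [ringStep, if_neg hneg]
  have hl : ([(rc.1 - 1, rc.2), (rc.1 + 1, rc.2), (rc.1, rc.2 - 1), (rc.1, rc.2 + 1)] : List (Int × Int)) = pvNbrs rc := rfl
  rw [hl, PySem.List.foldl_append_ite_eq_filter]
  rfl

-- fold facts used by the outer induction ------------------------------------

-- the visited set only grows, by cells of the frontier that are in the grid
lemma fold_v_prefix (sr sc rows cols d : Int) :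
    ∀ (cur : List (Int × Int)) (acc : PySem.Set (Int × Int) × List Int × List (Int × Int)),
      ∃ Δ, (cur.foldl (ringStep sr sc rows cols d) acc).1 = acc.1 ++ Δ ∧
        ∀ p ∈ Δ, p ∈ cur ∧ (0 ≤ p.1 ∧ p.1 < rows ∧ 0 ≤ p.2 ∧ p.2 < cols) := by
  intro cur
  induction cur with
  | nil => intro acc; exact ⟨[], by simp⟩
  | cons t cur' ih =>
    intro acc
    simp only [List.foldl_cons]
    by_cases hd : t ∈ acc.1 ∨ ¬(0 ≤ t.1 ∧ t.1 < rows ∧ 0 ≤ t.2 ∧ t.2 < cols)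
    · rw [ringStep_dead _ _ _ _ _ _ _ hd]
      obtain ⟨Δ, h1, h2⟩ := ih acc
      exact ⟨Δ, h1, fun p hp => ⟨List.mem_cons_of_mem _ (h2 p hp).1, (h2 p hp).2⟩⟩
    · push_neg at hd
      rw [ringStep_live _ _ _ _ _ _ _ hd.1 hd.2]
      obtain ⟨Δ, h1, h2⟩ := ih _
      refine ⟨t :: Δ, ?_, ?_⟩
      · rw [h1, PySem.Set.add_of_not_mem hd.1]
        simp
      · intro p hp
        rcases List.mem_cons.mp hp with rfl | hp
        · exact ⟨List.mem_cons_self, hd.2⟩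
        · exact ⟨List.mem_cons_of_mem _ (h2 p hp).1, (h2 p hp).2⟩

lemma fold_v_mem_of (sr sc rows cols d : Int) :
    ∀ (cur : List (Int × Int)) (acc : PySem.Set (Int × Int) × List Int × List (Int × Int)),
      ∀ p ∈ cur, (0 ≤ p.1 ∧ p.1 < rows ∧ 0 ≤ p.2 ∧ p.2 < cols) →
        p ∈ (cur.foldl (ringStep sr sc rows cols d) acc).1 := by
  intro cur
  induction cur with
  | nil => intro acc p hp; simp at hp
  | cons t cur' ih =>
    intro acc p hp hinb
    have hmono : ∀ (a : PySem.Set (Int × Int) × List Int × List (Int × Int)), ∀ q ∈ a.1,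
        q ∈ (cur'.foldl (ringStep sr sc rows cols d) a).1 := by
      intro a q hq
      obtain ⟨Δ, h1, _⟩ := fold_v_prefix sr sc rows cols d cur' a
      rw [h1]; exact List.mem_append_left _ hq
    rcases List.mem_cons.mp hp with rfl | hp
    · simp only [List.foldl_cons]
      by_cases hd : p ∈ acc.1
      · exact hmono _ _ (by rw [ringStep_dead _ _ _ _ _ _ _ (Or.inl hd)]; exact hd)
      · rw [ringStep_live _ _ _ _ _ _ _ hd hinb]
        exact hmono _ _ (by
          simp only []
          rw [PySem.Set.add_of_not_mem hd]
          exact List.mem_append_right _ (List.mem_singleton.mpr rfl))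
    · simp only [List.foldl_cons]
      exact ih _ p hp hinb

-- the next frontier only grows, by cells at distance d+1
lemma fold_nxt_prefix (sr sc rows cols d : Int) :
    ∀ (cur : List (Int × Int)) (acc : PySem.Set (Int × Int) × List Int × List (Int × Int)),
      ∃ Δ, (cur.foldl (ringStep sr sc rows cols d) acc).2.2 = acc.2.2 ++ Δ ∧
        ∀ p ∈ Δ, pvDist sr sc p = d + 1 := by
  intro cur
  induction cur with
  | nil => intro acc; exact ⟨[], by simp⟩
  | cons t cur' ih =>
    intro acc
    simp only [List.foldl_cons]
    by_cases hd : t ∈ acc.1 ∨ ¬(0 ≤ t.1 ∧ t.1 < rows ∧ 0 ≤ t.2 ∧ t.2 < cols)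
    · rw [ringStep_dead _ _ _ _ _ _ _ hd]; exact ih acc
    · push_neg at hd
      rw [ringStep_live _ _ _ _ _ _ _ hd.1 hd.2]
      obtain ⟨Δ, h1, h2⟩ := ih _
      refine ⟨(pvNbrs t).filter (fun p => decide (p ∉ PySem.Set.add acc.1 t ∧ pvDist sr sc p = d + 1)) ++ Δ, ?_, ?_⟩
      · rw [h1]; simp
      · intro p hp
        rcases List.mem_append.mp hp with hp | hp
        · exact (of_decide_eq_true (List.mem_filter.mp hp).2).2
        · exact h2 p hp

lemma fold_nodup (sr sc rows cols d : Int) :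
    ∀ (cur : List (Int × Int)) (acc : PySem.Set (Int × Int) × List Int × List (Int × Int)),
      acc.1.Nodup → (cur.foldl (ringStep sr sc rows cols d) acc).1.Nodup := by
  intro cur
  induction cur with
  | nil => intro acc h; exact h
  | cons t cur' ih =>
    intro acc h
    simp only [List.foldl_cons]
    by_cases hd : t ∈ acc.1 ∨ ¬(0 ≤ t.1 ∧ t.1 < rows ∧ 0 ≤ t.2 ∧ t.2 < cols)
    · rw [ringStep_dead _ _ _ _ _ _ _ hd]; exact ih acc h
    · push_neg at hd
      rw [ringStep_live _ _ _ _ _ _ _ hd.1 hd.2]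
      exact ih _ (PySem.Set.nodup_add _ _ h)

lemma fold_dead (sr sc rows cols d : Int) :
    ∀ (cur : List (Int × Int)) (acc : PySem.Set (Int × Int) × List Int × List (Int × Int)),
      (∀ c ∈ cur, c ∈ acc.1 ∨ ¬(0 ≤ c.1 ∧ c.1 < rows ∧ 0 ≤ c.2 ∧ c.2 < cols)) →
      cur.foldl (ringStep sr sc rows cols d) acc = acc := by
  intro cur
  induction cur with
  | nil => intro acc _; rfl
  | cons t cur' ih =>
    intro acc h
    simp only [List.foldl_cons]
    rw [ringStep_dead _ _ _ _ _ _ _ (h t List.mem_cons_self)]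
    exact ih acc (fun c hc => h c (List.mem_cons_of_mem _ hc))

-- every distance-(d+1) neighbour of a visited distance-d cell ends up in the next frontier
lemma fold_push_inv (sr sc rows cols d : Int) :
    ∀ (cur : List (Int × Int)) (acc : PySem.Set (Int × Int) × List Int × List (Int × Int)),
      (∀ c ∈ cur, pvDist sr sc c = d) →
      (∀ t ∈ acc.1, pvDist sr sc t ≤ d) →
      (∀ t ∈ acc.1, pvDist sr sc t = d → ∀ q ∈ pvNbrs t, pvDist sr sc q = d + 1 → q ∈ acc.2.2) →
      ∀ t ∈ (cur.foldl (ringStep sr sc rows cols d) acc).1, pvDist sr sc t = d →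
        ∀ q ∈ pvNbrs t, pvDist sr sc q = d + 1 →
          q ∈ (cur.foldl (ringStep sr sc rows cols d) acc).2.2 := by
  intro cur
  induction cur with
  | nil => intro acc _ _ hI; exact hI
  | cons t0 cur' ih =>
    intro acc hcur hvd hI
    simp only [List.foldl_cons]
    by_cases hd : t0 ∈ acc.1 ∨ ¬(0 ≤ t0.1 ∧ t0.1 < rows ∧ 0 ≤ t0.2 ∧ t0.2 < cols)
    · rw [ringStep_dead _ _ _ _ _ _ _ hd]
      exact ih acc (fun c hc => hcur c (List.mem_cons_of_mem _ hc)) hvd hI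
    · push_neg at hd
      rw [ringStep_live _ _ _ _ _ _ _ hd.1 hd.2]
      have ht0d : pvDist sr sc t0 = d := hcur t0 List.mem_cons_self
      refine ih _ (fun c hc => hcur c (List.mem_cons_of_mem _ hc)) ?_ ?_
      · intro t ht
        simp only [] at ht
        rw [PySem.Set.add_of_not_mem hd.1] at ht
        rcases List.mem_append.mp ht with ht | ht
        · exact hvd t ht
        · rw [List.mem_singleton.mp ht, ht0d]
      · intro t ht htd q hq hqd
        simp only [] at ht ⊢
        rw [PySem.Set.add_of_not_mem hd.1] at ht
        rcases List.mem_append.mp ht with ht | ht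
        · exact List.mem_append_left _ (hI t ht htd q hq hqd)
        · rcases List.mem_singleton.mp ht with rfl
          refine List.mem_append_right _ (List.mem_filter.mpr ⟨hq, ?_⟩)
          refine decide_eq_true ⟨?_, hqd⟩
          intro hmem
          rw [PySem.Set.add_of_not_mem hd.1] at hmem
          rcases List.mem_append.mp hmem with hmem | hmem
          · have := hvd q hmem; omega
          · rw [List.mem_singleton.mp hmem] at hqd
            omega

-- the inner simulation: running the sorted-queue loop through one frontier's worth
-- of pops (junk included) is exactly B's fold over that frontier
lemma ringInner (sr sc rows cols d : Int) (gs : List Int)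
    (hr : PySem.List.pyGetD gs 0 0 = rows) (hc : PySem.List.pyGetD gs 1 0 = cols) :
    ∀ (cur : List (Int × Int)) (v : PySem.Set (Int × Int)) (o : List Int) (nxt : List (Int × Int)),
      (∀ c ∈ cur, pvDist sr sc c = d) →
      (∀ c ∈ nxt, pvDist sr sc c = d + 1) →
      (∀ p ∈ v, pvDist sr sc p ≤ d) →
      (∀ p : Int × Int, (0 ≤ p.1 ∧ p.1 < rows ∧ 0 ≤ p.2 ∧ p.2 < cols) → pvDist sr sc p < d → p ∈ v) →
      ∃ k : Nat,
        k + (cur.foldl (ringStep sr sc rows cols d) (v, o, nxt)).2.2.length + 4 * v.length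
            ≤ cur.length + nxt.length + 4 * (cur.foldl (ringStep sr sc rows cols d) (v, o, nxt)).1.length
        ∧ ∀ slack,
            spiralLoopS sr sc gs (k + slack)
              (List.map (pvAtt sr sc) cur ++ List.map (pvAtt sr sc) nxt) v o
            = spiralLoopS sr sc gs slack
                (List.map (pvAtt sr sc) (cur.foldl (ringStep sr sc rows cols d) (v, o, nxt)).2.2)
                (cur.foldl (ringStep sr sc rows cols d) (v, o, nxt)).1
                (cur.foldl (ringStep sr sc rows cols d) (v, o, nxt)).2.1 := by
  intro cur
  induction cur with
  | nil =>
    intro v o nxt _ _ _ _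
    exact ⟨0, by simp, fun slack => by simp⟩
  | cons t cur' ih =>
    intro v o nxt hcur hnxt hv1 hv2
    have htd : pvDist sr sc t = d := hcur t List.mem_cons_self
    by_cases hmem : t ∈ v
    · -- dead pop: already visited
      obtain ⟨k', hk', heq'⟩ := ih v o nxt (fun c hc => hcur c (List.mem_cons_of_mem _ hc)) hnxt hv1 hv2
      have hdead : ringStep sr sc rows cols d (v, o, nxt) t = (v, o, nxt) :=
        ringStep_dead sr sc rows cols d (v, o, nxt) t (Or.inl hmem)
      refine ⟨k' + 1, ?_, ?_⟩
      · simp only [List.foldl_cons, hdead, List.length_cons]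
        omega
      · intro slack
        have harith : k' + 1 + slack = (k' + slack) + 1 := by omega
        rw [harith]
        simp only [List.map_cons, List.cons_append, spiralLoopS, pvAtt]
        rw [if_pos hmem]
        simp only [List.foldl_cons, hdead]
        exact heq' slack
    · by_cases hinb : 0 ≤ t.1 ∧ t.1 < rows ∧ 0 ≤ t.2 ∧ t.2 < cols
      · -- live pop
        have hvadd : PySem.Set.add v t = v ++ [t] := PySem.Set.add_of_not_mem hmem
        set v' := PySem.Set.add v t with hv'
        set Anew := (pvNbrs t).filter (fun p => decide (p ∉ v' ∧ pvDist sr sc p = d + 1)) with hAnew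
        set Jnew := (pvNbrs t).filter (fun p => decide (p ∉ v' ∧ pvDist sr sc p = d - 1)) with hJnew
        have hstep : ringStep sr sc rows cols d (v, o, nxt) t
            = (v', o ++ [t.1 * cols + t.2], nxt ++ Anew) := ringStep_live _ _ _ _ _ _ _ hmem hinb
        have hv'1 : ∀ p ∈ v', pvDist sr sc p ≤ d := by
          intro p hp
          rw [hvadd] at hp
          rcases List.mem_append.mp hp with hp | hp
          · exact hv1 p hp
          · rw [List.mem_singleton.mp hp, htd]
        have hv'2 : ∀ p : Int × Int, (0 ≤ p.1 ∧ p.1 < rows ∧ 0 ≤ p.2 ∧ p.2 < cols) →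
            pvDist sr sc p < d → p ∈ v' := by
          intro p h1 h2
          rw [hvadd]
          exact List.mem_append_left _ (hv2 p h1 h2)
        obtain ⟨k', hk', heq'⟩ := ih v' (o ++ [t.1 * cols + t.2]) (nxt ++ Anew)
          (fun c hc => hcur c (List.mem_cons_of_mem _ hc))
          (by
            intro c hcm
            rcases List.mem_append.mp hcm with hcm | hcm
            · exact hnxt c hcm
            · exact (of_decide_eq_true (List.mem_filter.mp hcm).2).2)
          hv'1 hv'2
        refine ⟨1 + Jnew.length + k', ?_, ?_⟩
        · have hfold : (t :: cur').foldl (ringStep sr sc rows cols d) (v, o, nxt)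
              = cur'.foldl (ringStep sr sc rows cols d) (v', o ++ [t.1 * cols + t.2], nxt ++ Anew) := by
            simp only [List.foldl_cons, hstep]
          rw [hfold]
          have hlen : v'.length = v.length + 1 := by rw [hvadd]; simp
          have hdisj : Jnew.length + Anew.length ≤ 4 := by
            have := pv_filter_disjoint_len
              (fun p => decide (p ∉ v' ∧ pvDist sr sc p = d - 1))
              (fun p => decide (p ∉ v' ∧ pvDist sr sc p = d + 1))
              (by
                intro x ⟨hx1, hx2⟩
                have h1 := of_decide_eq_true hx1
                have h2 := of_decide_eq_true hx2
                omega)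
              (pvNbrs t)
            simpa [pvNbrs, hJnew, hAnew] using this
          rw [hlen] at hk'
          simp only [List.length_append, List.length_cons] at hk' ⊢
          omega
        · intro slack
          have harith : 1 + Jnew.length + k' + slack = (Jnew.length + (k' + slack)) + 1 := by omega
          rw [harith]
          simp only [List.map_cons, List.cons_append, spiralLoopS]
          have hpm : ((pvAtt sr sc t).1, (pvAtt sr sc t).2.1) = t := rfl
          rw [if_neg (by rw [hpm] at *; exact hmem), if_pos (by rw [hr, hc]; exact hinb)]
          simp only [pvAtt]
          have hqfold : ([(t.1 - 1, t.2), (t.1 + 1, t.2), (t.1, t.2 - 1), (t.1, t.2 + 1)] : List (Int × Int)).foldl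
              (fun q p => if p ∈ PySem.Set.add v (t.1, t.2) then q
                else pushB q (p.1, p.2, |p.1 - sr| + |p.2 - sc|))
              (List.map (pvAtt sr sc) cur' ++ List.map (pvAtt sr sc) nxt)
              = List.map (pvAtt sr sc) Jnew ++ List.map (pvAtt sr sc) cur'
                  ++ List.map (pvAtt sr sc) (nxt ++ Anew) := by
            have hlist : ([(t.1 - 1, t.2), (t.1 + 1, t.2), (t.1, t.2 - 1), (t.1, t.2 + 1)] : List (Int × Int)) = pvNbrs t := rfl
            have hteta : (t.1, t.2) = t := rfl
            rw [hlist, hteta]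
            have := pv_pushFold sr sc d v' (pvNbrs t) [] cur' nxt
              (by
                intro p hp
                have := nbr_dist sr sc t p hp
                rw [htd] at this
                exact this)
              (by intro p hp; simp at hp)
              (fun c hcm => hcur c (List.mem_cons_of_mem _ hcm))
              hnxt
            simpa [hv', hJnew, hAnew] using this
          have hJdead : ∀ e ∈ List.map (pvAtt sr sc) Jnew, (e.1, e.2.1) ∈ PySem.Set.add v (t.1, t.2) ∨
              ¬(0 ≤ e.1 ∧ e.1 < PySem.List.pyGetD gs 0 0 ∧ 0 ≤ e.2.1 ∧ e.2.1 < PySem.List.pyGetD gs 1 0) := by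
            intro e he
            obtain ⟨z, hz, rfl⟩ := List.mem_map.mp he
            have hzf := List.mem_filter.mp hz
            have hzp := of_decide_eq_true hzf.2
            right
            rw [hr, hc]
            intro hzin
            exact hzp.1 (hv'2 z hzin (by omega))
          have hrest : spiralLoopS sr sc gs (Jnew.length + (k' + slack))
              (List.map (pvAtt sr sc) Jnew ++ List.map (pvAtt sr sc) cur'
                ++ List.map (pvAtt sr sc) (nxt ++ Anew))
              (PySem.Set.add v (t.1, t.2)) (o ++ [t.1 * PySem.List.pyGetD gs 1 0 + t.2])
              = spiralLoopS sr sc gs slack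
                  (List.map (pvAtt sr sc) (List.foldl (ringStep sr sc rows cols d) (v, o, nxt) (t :: cur')).2.2)
                  (List.foldl (ringStep sr sc rows cols d) (v, o, nxt) (t :: cur')).1
                  (List.foldl (ringStep sr sc rows cols d) (v, o, nxt) (t :: cur')).2.1 := by
            have hskip := loopS_skip sr sc gs (List.map (pvAtt sr sc) Jnew)
              (List.map (pvAtt sr sc) cur' ++ List.map (pvAtt sr sc) (nxt ++ Anew))
              (PySem.Set.add v (t.1, t.2)) (o ++ [t.1 * PySem.List.pyGetD gs 1 0 + t.2]) hJdead (k' + slack)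
            rw [List.length_map] at hskip
            rw [List.append_assoc, hskip]
            have hteta : (t.1, t.2) = t := rfl
            rw [hteta, hc]
            have := heq' slack
            simp only [List.foldl_cons, hstep]
            simpa [hv'] using this
          exact (congrArg (fun Q => spiralLoopS sr sc gs (Jnew.length + (k' + slack)) Q
            (PySem.Set.add v (t.1, t.2)) (o ++ [t.1 * PySem.List.pyGetD gs 1 0 + t.2])) hqfold).trans hrest
      · -- dead pop: out of bounds
        obtain ⟨k', hk', heq'⟩ := ih v o nxt (fun c hc => hcur c (List.mem_cons_of_mem _ hc)) hnxt hv1 hv2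
        have hdead : ringStep sr sc rows cols d (v, o, nxt) t = (v, o, nxt) :=
          ringStep_dead sr sc rows cols d (v, o, nxt) t (Or.inr hinb)
        refine ⟨k' + 1, ?_, ?_⟩
        · simp only [List.foldl_cons, hdead, List.length_cons]
          omega
        · intro slack
          have harith : k' + 1 + slack = (k' + slack) + 1 := by omega
          rw [harith]
          simp only [List.map_cons, List.cons_append, spiralLoopS, pvAtt]
          rw [if_neg hmem, if_neg (by rw [hr, hc]; exact hinb)]
          simp only [List.foldl_cons, hdead]
          exact heq' slack

-- the outer simulation: ring by ring, with the unvisited-cell count as the measure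
lemma ringOuter (sr sc rows cols : Int) (gs : List Int)
    (hr : PySem.List.pyGetD gs 0 0 = rows) (hc : PySem.List.pyGetD gs 1 0 = cols)
    (hs : 0 ≤ sr ∧ sr < rows ∧ 0 ≤ sc ∧ sc < cols) :
    ∀ (U : Nat) (d : Int) (cur : List (Int × Int)) (v : PySem.Set (Int × Int)) (o : List Int),
      0 ≤ d →
      (∀ c ∈ cur, pvDist sr sc c = d) →
      (∀ p : Int × Int, p ∈ v ↔ ((0 ≤ p.1 ∧ p.1 < rows ∧ 0 ≤ p.2 ∧ p.2 < cols) ∧ pvDist sr sc p < d)) →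
      (∀ p : Int × Int, (0 ≤ p.1 ∧ p.1 < rows ∧ 0 ≤ p.2 ∧ p.2 < cols) → pvDist sr sc p = d → p ∈ cur) →
      v.Nodup →
      rows.toNat * cols.toNat ≤ U + v.length →
      ∀ fA fB : Nat,
        cur.length + 4 * (rows.toNat * cols.toNat) ≤ fA + 4 * v.length →
        U + 1 ≤ fB →
        spiralLoopS sr sc gs fA (List.map (pvAtt sr sc) cur) v o
          = ringLoop sr sc rows cols fB cur v o d := by
  intro U
  induction U using Nat.strong_induction_on with
  | _ U IH =>
    intro d cur v o hd0 hcur hv hcomp hnd hU fA fB hfA hfB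
    have hvlen : v.length ≤ rows.toNat * cols.toNat :=
      pv_card_le rows cols v hnd (fun p hp => ((hv p).mp hp).1)
    cases cur with
    | nil =>
      rw [List.map_nil, loopS_nil]
      obtain ⟨fB', rfl⟩ : ∃ fB', fB = fB' + 1 := ⟨fB - 1, by omega⟩
      simp [ringLoop]
    | cons t0 cur' =>
      obtain ⟨fB', rfl⟩ : ∃ fB', fB = fB' + 1 := ⟨fB - 1, by omega⟩
      set cur := t0 :: cur' with hcurdef
      set res := cur.foldl (ringStep sr sc rows cols d) (v, o, []) with hres
      obtain ⟨k, hk, heq⟩ := ringInner sr sc rows cols d gs hr hc cur v o []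
        hcur (by simp) (fun p hp => le_of_lt ((hv p).mp hp).2)
        (fun p h1 h2 => (hv p).mpr ⟨h1, h2⟩)
      rw [← hres] at hk heq
      obtain ⟨Δ, hΔ1, hΔ2⟩ := fold_v_prefix sr sc rows cols d cur (v, o, [])
      obtain ⟨Δn, hΔn1, hΔn2⟩ := fold_nxt_prefix sr sc rows cols d cur (v, o, [])
      rw [← hres] at hΔ1 hΔn1
      simp only [List.nil_append] at hΔn1
      have hresnodup : res.1.Nodup := by
        rw [hres]; exact fold_nodup sr sc rows cols d cur (v, o, []) hnd
      have hresinb : ∀ p ∈ res.1, 0 ≤ p.1 ∧ p.1 < rows ∧ 0 ≤ p.2 ∧ p.2 < cols := by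
        intro p hp
        rw [hΔ1] at hp
        rcases List.mem_append.mp hp with hp | hp
        · exact ((hv p).mp hp).1
        · exact (hΔ2 p hp).2
      have hreslen : res.1.length ≤ rows.toNat * cols.toNat :=
        pv_card_le rows cols res.1 hresnodup hresinb
      have hkfA : k ≤ fA := by
        simp only [List.length_nil] at hk
        omega
      have hloopA : spiralLoopS sr sc gs fA (List.map (pvAtt sr sc) cur) v o
          = spiralLoopS sr sc gs (fA - k) (List.map (pvAtt sr sc) res.2.2) res.1 res.2.1 := by
        have := heq (fA - k)
        rw [Nat.add_sub_cancel' hkfA] at this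
        simpa using this
      have hstep : ringLoop sr sc rows cols (fB' + 1) cur v o d
          = ringLoop sr sc rows cols fB' res.2.2 res.1 res.2.1 (d + 1) := by
        simp only [ringLoop, hcurdef, List.isEmpty_cons]
        rfl
      rw [hloopA, hstep]
      cases Δ with
      | nil =>
        -- no new cell: every frontier cell is dead, the run is over
        rw [List.append_nil] at hΔ1
        have halldead : ∀ c ∈ cur, c ∈ v ∨ ¬(0 ≤ c.1 ∧ c.1 < rows ∧ 0 ≤ c.2 ∧ c.2 < cols) := by
          intro c hcm
          by_cases hcb : 0 ≤ c.1 ∧ c.1 < rows ∧ 0 ≤ c.2 ∧ c.2 < cols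
          · left
            have := fold_v_mem_of sr sc rows cols d cur (v, o, []) c hcm hcb
            rw [← hres, hΔ1] at this
            exact this
          · exact Or.inr hcb
        have hresv : res = (v, o, []) := fold_dead sr sc rows cols d cur (v, o, []) halldead
        rw [hresv]
        simp only [List.map_nil]
        rw [loopS_nil, ringLoop_nil]
      | cons x Δ' =>
        have hreslen2 : v.length + 1 ≤ res.1.length := by
          rw [hΔ1]; simp
        have hU1 : 1 ≤ U := by omega
        have hnext : ∀ c ∈ res.2.2, pvDist sr sc c = d + 1 := by
          intro c hcm
          rw [hΔn1] at hcm
          exact hΔn2 c hcm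
        have hv' : ∀ p : Int × Int, p ∈ res.1 ↔
            ((0 ≤ p.1 ∧ p.1 < rows ∧ 0 ≤ p.2 ∧ p.2 < cols) ∧ pvDist sr sc p < d + 1) := by
          intro p
          constructor
          · intro hp
            refine ⟨hresinb p hp, ?_⟩
            rw [hΔ1] at hp
            rcases List.mem_append.mp hp with hp | hp
            · have := ((hv p).mp hp).2; omega
            · have := hcur p (hΔ2 p hp).1; omega
          · rintro ⟨h1, h2⟩
            by_cases h3 : pvDist sr sc p < d
            · rw [hΔ1]
              exact List.mem_append_left _ ((hv p).mpr ⟨h1, h3⟩)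
            · have h4 : pvDist sr sc p = d := by omega
              exact fold_v_mem_of sr sc rows cols d cur (v, o, []) p (hcomp p h1 h4) h1
        have hcomp' : ∀ p : Int × Int, (0 ≤ p.1 ∧ p.1 < rows ∧ 0 ≤ p.2 ∧ p.2 < cols) →
            pvDist sr sc p = d + 1 → p ∈ res.2.2 := by
          intro q hq hqd
          obtain ⟨t, htinb, htd, hqnbr⟩ := pv_toward sr sc rows cols hs q hq
            (by have := pvDist_nonneg sr sc q; omega)
          rw [hqd] at htd
          have htd' : pvDist sr sc t = d := by omega
          have htin : t ∈ res.1 :=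
            fold_v_mem_of sr sc rows cols d cur (v, o, []) t (hcomp t htinb htd') htinb
          exact fold_push_inv sr sc rows cols d cur (v, o, []) hcur
            (fun p hp => le_of_lt ((hv p).mp hp).2)
            (by
              intro p hp hpd
              have := ((hv p).mp hp).2
              omega)
            t htin htd' q hqnbr hqd
        have := IH (U - 1) (by omega) (d + 1) res.2.2 res.1 res.2.1
          (by omega) hnext hv' hcomp' hresnodup (by omega)
          (fA - k) fB'
          (by simp only [List.length_nil] at hk; omega)
          (by omega)
        exact this

-- distance facts for the initial state
lemma pvDist_self (sr sc : Int) : pvDist sr sc (sr, sc) = 0 := by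
  simp [pvDist]

lemma pvDist_eq_zero (sr sc : Int) (p : Int × Int) (h : pvDist sr sc p = 0) : p = (sr, sc) := by
  obtain ⟨p1, p2⟩ := p
  simp only [pvDist, Int.abs_eq_natAbs] at h
  have : p1 = sr ∧ p2 = sc := by omega
  simp [this.1, this.2]

-- ===== VERDICT (by name: the statement is the Claim_ definition above) =====
theorem generate_spiral_order_spec : Claim_equal_generate_spiral_order := by
  intro sr sc gs _ _
  unfold Spec_generate_spiral_order generate_spiral_order_alt
  rw [A_eq_S]
  set rows := PySem.List.pyGetD gs 0 0 with hrows
  set cols := PySem.List.pyGetD gs 1 0 with hcols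
  by_cases hG : sr < 0 ∨ rows ≤ sr ∨ sc < 0 ∨ cols ≤ sc
  · rw [if_pos hG]
    have hfuel : pvFuel gs = (4 * (rows.toNat * cols.toNat)) + 1 := rfl
    rw [hfuel]
    simp only [spiralLoopS]
    rw [if_neg (by simp), if_neg (by rw [← hrows, ← hcols]; omega)]
    exact loopS_nil sr sc gs _ _ _
  · rw [if_neg hG]
    push_neg at hG
    have hs : 0 ≤ sr ∧ sr < rows ∧ 0 ≤ sc ∧ sc < cols := ⟨hG.1, hG.2.1, hG.2.2.1, hG.2.2.2⟩
    have hinit : ([(sr, sc, 0)] : List (Int × Int × Int)) = List.map (pvAtt sr sc) [(sr, sc)] := by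
      simp [pvAtt, pvDist_self]
    rw [hinit]
    refine ringOuter sr sc rows cols gs rfl rfl hs (rows.toNat * cols.toNat) 0 [(sr, sc)] [] []
      le_rfl ?_ ?_ ?_ List.nodup_nil (by omega) (pvFuel gs) (pvFuelB rows cols) ?_ ?_
    · intro c hcm
      rw [List.mem_singleton.mp hcm]
      exact pvDist_self sr sc
    · intro p
      simp only [List.not_mem_nil, false_iff, not_and]
      intro _
      have := pvDist_nonneg sr sc p
      omega
    · intro p _ hp0
      rw [List.mem_singleton]
      exact pvDist_eq_zero sr sc p hp0
    · have hfuel : pvFuel gs = (4 * (rows.toNat * cols.toNat)) + 1 := rfl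
      rw [hfuel]
      simp
      omega
    · simp [pvFuelB]
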